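-- pv_equiv track=rewrite | github.com/tolgacanunal/advent-of-code | 2023/day-4/solution.py | get_part_two_solution
-- ===== SOURCE A (Python) =====
-- from collections import defaultdict
-- from typing import Set, Tuple
--
-- def get_part_two_solution(parsed_card_list: list[Tuple[Set[str], Set[str]]]) -> str:
--     total_count = 0
--     scratch_card_count_hashmap = defaultdict(lambda: 1)
--     for index, (winning_cards, players_cards) in enumerate(parsed_card_list):
--         for _ in range(0, scratch_card_count_hashmap[index]):
--             winning_count = 0
--             for p_card in players_cards:
--                 if p_card in winning_cards:
--                     winning_count += 1
--             for i in range(index + 1, index + 1 + winning_count):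
--                 scratch_card_count_hashmap[i] += 1
--         total_count += scratch_card_count_hashmap[index]
--     return total_count
-- ===== SOURCE B (Python) =====
-- def get_part_two_solution(parsed_card_list):
--     # Backward dynamic programming: the value of a card (how many scratch cards
--     # one copy of it ultimately yields, itself included) is 1 plus the values of
--     # the cards it wins; the answer is the sum of all card values.
--     values = []
--     for winning_cards, players_cards in reversed(parsed_card_list):
--         winning_count = 0
--         for p_card in players_cards:
--             if p_card in winning_cards:
--                 winning_count += 1
--         values = [1 + sum(values[:winning_count])] + values
--     return sum(values)
-- ===== Notes on version B (the rewrite author's own statement) =====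
-- stated objective: alternative
-- what changed: A simulates copies forward with a copy-count dict, re-running the membership scan and the +1 range updates once per copy of each card; B processes the cards in reverse with a dynamic program (value of a card = 1 + values of the cards it wins) and returns the sum of values, with no copy counts and no dict.
import Mathlib
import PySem

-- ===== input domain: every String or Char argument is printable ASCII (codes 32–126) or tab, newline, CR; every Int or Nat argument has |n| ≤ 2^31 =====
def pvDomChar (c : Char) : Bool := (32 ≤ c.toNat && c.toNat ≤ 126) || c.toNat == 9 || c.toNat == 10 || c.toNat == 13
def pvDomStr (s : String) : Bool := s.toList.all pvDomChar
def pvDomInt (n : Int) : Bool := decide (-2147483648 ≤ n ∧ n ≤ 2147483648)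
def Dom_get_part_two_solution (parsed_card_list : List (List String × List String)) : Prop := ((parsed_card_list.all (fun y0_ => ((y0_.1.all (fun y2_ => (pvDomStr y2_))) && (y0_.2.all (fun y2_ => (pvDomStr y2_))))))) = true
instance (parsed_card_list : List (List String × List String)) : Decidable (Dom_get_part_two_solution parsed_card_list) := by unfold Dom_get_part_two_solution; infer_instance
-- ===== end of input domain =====

-- B replaces A's forward per-copy simulation (a copy-count dict, re-scanning and re-updating once
-- per copy) by a backward dynamic program: value of a card = 1 + values of the cards it wins,
-- answer = sum of values.

-- ===== PORT A =====
-- the defaultdict's insert-on-read (d[index]) is modelled by getD with default 1: the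
-- inserted value is the default itself and all later reads use the same default, so it
-- is value-identical; the return value (an Int) is unaffected.
def pvA_step (acc : Int × PySem.Dict Int Int) (p : Int × (List String × List String)) :
    Int × PySem.Dict Int Int :=
  let d := (PySem.List.pyRange 0 (acc.2.getD p.1 1) 1).foldl (fun d _ =>
      let winning_count := p.2.2.foldl
        (fun wc p_card => if p.2.1.contains p_card then wc + 1 else wc) (0 : Int)
      (PySem.List.pyRange (p.1 + 1) (p.1 + 1 + winning_count) 1).foldl
        (fun d i => d.insert i (d.getD i 1 + 1)) d) acc.2
  (acc.1 + d.getD p.1 1, d)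

def get_part_two_solution (parsed_card_list : List (List String × List String)) : Int :=
  ((PySem.List.enumerate parsed_card_list).foldl pvA_step (0, PySem.Dict.empty)).1

-- ===== PORT B =====
def get_part_two_solution_alt (parsed_card_list : List (List String × List String)) : Int :=
  (parsed_card_list.reverse.foldl (fun values card =>
      let winning_count := card.2.foldl
        (fun wc p_card => if card.1.contains p_card then wc + 1 else wc) (0 : Int)
      (1 + (PySem.List.slice values none (some winning_count)).sum) :: values)
    ([] : List Int)).sum

-- ===== PRECONDITION & SPEC =====
def Spec_get_part_two_solution (parsed_card_list : List (List String × List String)) (out : Int) : Prop := out = get_part_two_solution_alt parsed_card_list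
instance (parsed_card_list : List (List String × List String)) (out : Int) : Decidable (Spec_get_part_two_solution parsed_card_list out) := by unfold Spec_get_part_two_solution; infer_instance

-- ===== CLAIM (what is proved, stated in full; the proofs are below) =====
def Claim_equal_get_part_two_solution : Prop := ∀ (parsed_card_list : List (List String × List String)), Dom_get_part_two_solution parsed_card_list → Spec_get_part_two_solution parsed_card_list (get_part_two_solution parsed_card_list)

-- ===== LEMMAS AND PROOFS =====

-- the winning count of one card (shared shape of both ports' inner scans)
def pvWC (card : List String × List String) : Int :=
  card.2.foldl (fun wc p_card => if card.1.contains p_card then wc + 1 else wc) (0 : Int)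

-- B's backward DP value list, as a function of the cards' winning counts
def pvVList : List Int → List Int
  | [] => []
  | w :: ws => (1 + ((pvVList ws).take w.toNat).sum) :: pvVList ws

-- add c to the first n entries of a pending-count list (default entry 1)
def pvBump : Nat → Int → List Int → List Int
  | 0, _, q => q
  | n + 1, c, [] => (1 + c) :: pvBump n c []
  | n + 1, c, x :: q => (x + c) :: pvBump n c q

-- A's remaining total, abstracted over the pending copy counts
def pvF : List Int → List Int → Int
  | [], _ => 0
  | w :: ws, p => p.getD 0 1 + pvF ws (pvBump w.toNat (p.getD 0 1) (p.drop 1))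

-- weighted sum of a value list against a pending list (default weight 1)
def pvDot : List Int → List Int → Int
  | [], _ => 0
  | x :: v, p => p.getD 0 1 * x + pvDot v (p.drop 1)

theorem pvWC_fold_mono (w : List String) (pl : List String) :
    ∀ x : Int, x ≤ pl.foldl (fun wc p_card => if w.contains p_card then wc + 1 else wc) x := by
  induction pl with
  | nil => intro x; simp
  | cons h t ih =>
    intro x
    simp only [List.foldl_cons]
    calc x ≤ (if w.contains h then x + 1 else x) := by split <;> omega
      _ ≤ _ := ih _

theorem pvWC_nonneg (card : List String × List String) : 0 ≤ pvWC card :=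
  pvWC_fold_mono card.1 card.2 0

-- getD after one pass of "+1" inserts over a duplicate-free list of keys
theorem pv_getD_pass (rng : List Int) (hn : rng.Nodup) (d : PySem.Dict Int Int) (k : Int) :
    (rng.foldl (fun d i => d.insert i (d.getD i 1 + 1)) d).getD k 1 =
      d.getD k 1 + (if k ∈ rng then 1 else 0) := by
  induction rng generalizing d with
  | nil => simp
  | cons i rest ih =>
    simp only [List.foldl_cons, List.nodup_cons] at *
    rw [ih hn.2, PySem.Dict.getD_insert]
    by_cases hk : k = i
    · subst hk
      simp [hn.1]
    · simp [hk, List.mem_cons]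

-- getD after repeating the "+1" pass once per element of m
theorem pv_getD_rep {α : Type} (m : List α) (rng : List Int) (hn : rng.Nodup)
    (d : PySem.Dict Int Int) (k : Int) :
    (m.foldl (fun d _ => rng.foldl (fun d i => d.insert i (d.getD i 1 + 1)) d) d).getD k 1 =
      d.getD k 1 + (m.length : Int) * (if k ∈ rng then 1 else 0) := by
  induction m generalizing d with
  | nil => simp
  | cons _ rest ih =>
    simp only [List.foldl_cons, List.length_cons]
    rw [ih, pv_getD_pass rng hn]
    push_cast
    ring

theorem pv_getD_drop_one {α : Type} (p : List α) (j : Nat) (d : α) :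
    (p.drop 1).getD j d = p.getD (j + 1) d := by
  cases p <;> simp

theorem pvBump_getD (n : Nat) (c : Int) :
    ∀ (q : List Int) (j : Nat),
      (pvBump n c q).getD j 1 = q.getD j 1 + (if j < n then c else 0) := by
  induction n with
  | zero => intro q j; simp [pvBump]
  | succ n ih =>
    intro q j
    cases q with
    | nil =>
      cases j with
      | zero => simp [pvBump]
      | succ j => simpa [pvBump] using ih [] j
    | cons x q =>
      cases j with
      | zero => simp [pvBump]
      | succ j => simpa [pvBump] using ih q j

-- A's enumerate-fold computes pvF of the winning counts, given the dict matches the pending list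
theorem pvA_fold (cl : List (List String × List String)) :
    ∀ (s t : Int) (d : PySem.Dict Int Int) (p : List Int),
      (∀ j : Nat, d.getD (s + (j : Int)) 1 = p.getD j 1) →
      (∀ j : Nat, 1 ≤ p.getD j 1) →
      ((PySem.List.enumerate cl s).foldl pvA_step (t, d)).1 = t + pvF (cl.map pvWC) p := by
  induction cl with
  | nil => intro s t d p _ _; simp [pvF]
  | cons card rest ih =>
    intro s t d p hD hP
    simp only [PySem.List.enumerate_cons, List.foldl_cons, List.map_cons]
    have hc0 : d.getD s 1 = p.getD 0 1 := by simpa using hD 0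
    have hcpos : 1 ≤ p.getD 0 1 := hP 0
    set c := p.getD 0 1 with hc
    set wc := pvWC card with hwcdef
    have hwc0 : 0 ≤ wc := pvWC_nonneg card
    have hnod := PySem.List.nodup_pyRange_one (a := s + 1) (b := s + 1 + wc)
    -- the dict after the step
    have hstep : ∀ k, (pvA_step (t, d) (s, card)).2.getD k 1 =
        d.getD k 1 + c * (if k ∈ PySem.List.pyRange (s + 1) (s + 1 + wc) 1 then 1 else 0) := by
      intro k
      show ((PySem.List.pyRange 0 (d.getD s 1) 1).foldl (fun d _ =>
          (PySem.List.pyRange (s + 1) (s + 1 + pvWC card) 1).foldl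
            (fun d i => d.insert i (d.getD i 1 + 1)) d) d).getD k 1 = _
      rw [pv_getD_rep _ _ hnod, PySem.List.length_pyRange_one, hc0]
      have : ((p.getD 0 1 - 0).toNat : Int) = c := by omega
      rw [this]
    have hsnot : s ∉ PySem.List.pyRange (s + 1) (s + 1 + wc) 1 := by
      rw [PySem.List.mem_pyRange_one]; omega
    have htot : (pvA_step (t, d) (s, card)).1 = t + c := by
      show t + (pvA_step (t, d) (s, card)).2.getD s 1 = _
      rw [hstep s]
      simp [hsnot, hc0]
    -- new pending list
    have hD' : ∀ j : Nat, (pvA_step (t, d) (s, card)).2.getD (s + 1 + (j : Int)) 1 =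
        (pvBump wc.toNat c (p.drop 1)).getD j 1 := by
      intro j
      rw [hstep, pvBump_getD]
      have hmem : (s + 1 + (j : Int)) ∈ PySem.List.pyRange (s + 1) (s + 1 + wc) 1 ↔
          j < wc.toNat := by
        rw [PySem.List.mem_pyRange_one]; omega
      have hdrop : (p.drop 1).getD j 1 = p.getD (j + 1) 1 := pv_getD_drop_one p j 1
      have hdd : d.getD (s + 1 + (j : Int)) 1 = p.getD (j + 1) 1 := by
        have := hD (j + 1)
        rw [← this]
        congr 1
        push_cast
        ring
      rw [hdd, hdrop]
      by_cases hj : j < wc.toNat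
      · rw [if_pos (hmem.mpr hj), if_pos hj]; ring
      · rw [if_neg (fun h => hj (hmem.mp h)), if_neg hj]; ring
    have hP' : ∀ j : Nat, 1 ≤ (pvBump wc.toNat c (p.drop 1)).getD j 1 := by
      intro j
      rw [pvBump_getD]
      have h1 : 1 ≤ (p.drop 1).getD j 1 := by
        rw [pv_getD_drop_one p j 1]; exact hP (j + 1)
      split <;> omega
    have := ih (s + 1) (pvA_step (t, d) (s, card)).1 (pvA_step (t, d) (s, card)).2
      (pvBump wc.toNat c (p.drop 1)) hD' hP'
    rw [this, htot]
    simp only [pvF]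
    ring

theorem pvDot_bump (v : List Int) :
    ∀ (n : Nat) (c : Int) (q : List Int),
      pvDot v (pvBump n c q) = pvDot v q + c * ((v.take n).sum) := by
  induction v with
  | nil => intro n c q; simp [pvDot]
  | cons x v ih =>
    intro n c q
    cases n with
    | zero => simp [pvBump, pvDot]
    | succ n =>
      cases q with
      | nil =>
        simp only [pvBump, pvDot, List.take_succ_cons, List.sum_cons, List.getD_nil,
          List.getD_cons_zero, List.drop_succ_cons, List.drop_nil, List.drop_zero]
        rw [ih n c []]
        ring
      | cons y q =>
        simp only [pvBump, pvDot, List.take_succ_cons, List.sum_cons,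
          List.getD_cons_zero, List.drop_succ_cons, List.drop_zero]
        rw [ih n c q]
        ring

theorem pvF_eq_dot (ws : List Int) :
    ∀ p : List Int, pvF ws p = pvDot (pvVList ws) p := by
  induction ws with
  | nil => intro p; simp [pvF, pvVList, pvDot]
  | cons w ws ih =>
    intro p
    simp only [pvF, pvVList, pvDot]
    rw [ih, pvDot_bump]
    ring

theorem pvDot_nil (v : List Int) : pvDot v [] = v.sum := by
  induction v with
  | nil => simp [pvDot]
  | cons x v ih => simp [pvDot, ih]

-- B's reversed fold builds exactly pvVList of the winning counts
theorem pvB_eq (l : List (List String × List String)) :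
    get_part_two_solution_alt l = (pvVList (l.map pvWC)).sum := by
  unfold get_part_two_solution_alt
  rw [List.foldl_reverse]
  congr 1
  induction l with
  | nil => rfl
  | cons card rest ih =>
    simp only [List.foldr_cons, List.map_cons, pvVList]
    rw [ih]
    congr 1
    have h0 : 0 ≤ pvWC card := pvWC_nonneg card
    have : pvWC card = ((pvWC card).toNat : Int) := by omega
    show 1 + (PySem.List.slice (pvVList (rest.map pvWC)) none (some (pvWC card))).sum = _
    rw [this, PySem.List.slice_to_natCast]
    simp
    rw [max_eq_left h0]

-- ===== VERDICT (by name: the statement is the Claim_ definition above) =====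
theorem get_part_two_solution_spec : Claim_equal_get_part_two_solution := by
  intro l _
  show get_part_two_solution l = get_part_two_solution_alt l
  unfold get_part_two_solution
  rw [pvA_fold l 0 0 PySem.Dict.empty [] (fun j => by simp) (fun j => by simp)]
  rw [pvF_eq_dot, pvDot_nil, pvB_eq]
  simp
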